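-- pv_equiv track=rewrite | github.com/AnnaLara/SOLID_blogposts | single_responsibility/corrected_code.py | replace_with_correct_letter
-- ===== SOURCE A (Python) =====
-- def list_to_string(word_list):
--     '''Join all the elements in the list into a string'''
--     word = ''
--     for n in word_list:
--         word += n
--     return word
--
-- def string_to_list(word):
--     '''Split string into a list of single characters'''
--     return [char for char in word]
--
-- def replace_with_correct_letter(letter, word, guessed_w):
--     '''Replace '*' in guessed_w with all the occurances of the letter in word'''
--
--     positions = [pos for pos, char in enumerate(word, 0) if char == letter]
--
--     for i, char in enumerate(guessed_w):
--         if i in positions: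
--             array = string_to_list(guessed_w)
--             array[i] = letter
--             guessed_w = list_to_string(array)
--
--     return guessed_w
-- ===== SOURCE B (Python) =====
-- def replace_with_correct_letter(letter, word, guessed_w):
--     '''Replace '*' in guessed_w with all the occurances of the letter in word'''
--     res = [letter if wc == letter else guessed_c for wc, guessed_c in zip(word, guessed_w)]
--     res.append(guessed_w[len(word):])
--     return ''.join(res)
-- ===== Notes on version B (the rewrite author's own statement) =====
-- stated objective: simpler
-- what changed: Drops the positions index list and the per-hit list-rebuild loop: a single zip over word and guessed_w picks letter or the guessed character per position, then the tail of guessed_w beyond word's length is appended and joined once.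
import Mathlib
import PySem

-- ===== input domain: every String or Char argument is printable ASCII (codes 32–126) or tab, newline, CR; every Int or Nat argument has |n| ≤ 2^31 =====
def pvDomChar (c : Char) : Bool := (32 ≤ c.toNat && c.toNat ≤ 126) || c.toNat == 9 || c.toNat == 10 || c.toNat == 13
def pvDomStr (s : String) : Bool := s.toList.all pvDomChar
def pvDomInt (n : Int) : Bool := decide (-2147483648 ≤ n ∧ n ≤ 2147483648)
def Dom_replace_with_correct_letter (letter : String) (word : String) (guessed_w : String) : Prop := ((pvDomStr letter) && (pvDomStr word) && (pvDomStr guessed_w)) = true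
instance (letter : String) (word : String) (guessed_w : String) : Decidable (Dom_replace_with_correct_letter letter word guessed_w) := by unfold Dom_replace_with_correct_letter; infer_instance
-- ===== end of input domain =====

-- B drops A's positions list and per-hit string rebuild: one zip over word and guessed_w
-- chooses letter or the guessed char, then appends guessed_w's tail beyond word's length (simpler).

-- ===== PORT A =====
def list_to_string_port (word_list : List String) : String :=
  word_list.foldl (fun word n => word ++ n) ""

def string_to_list_port (word : String) : List String :=
  word.toList.map (fun ch => String.ofList [ch])

def replace_with_correct_letter (letter : String) (word : String) (guessed_w : String) : String :=
  let positions := ((PySem.List.enumerate word.toList 0).filter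
      (fun p => String.ofList [p.2] == letter)).map (fun p => p.1)
  (PySem.List.enumerate guessed_w.toList 0).foldl
    (fun g p =>
      if p.1 ∈ positions then
        list_to_string_port ((string_to_list_port g).set p.1.toNat letter)
      else g)
    guessed_w

-- ===== PORT B =====
def replace_with_correct_letter_alt (letter : String) (word : String) (guessed_w : String) : String :=
  let res := (List.zip word.toList guessed_w.toList).map
      (fun p => if String.ofList [p.1] == letter then letter else String.ofList [p.2])
  String.join (res ++ [String.ofList (guessed_w.toList.drop word.toList.length)])

-- ===== PRECONDITION & SPEC =====
def Spec_replace_with_correct_letter (letter : String) (word : String) (guessed_w : String) (out : String) : Prop := out = replace_with_correct_letter_alt letter word guessed_w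
instance (letter : String) (word : String) (guessed_w : String) (out : String) : Decidable (Spec_replace_with_correct_letter letter word guessed_w out) := by unfold Spec_replace_with_correct_letter; infer_instance

-- ===== CLAIM (what is proved, stated in full; the proofs are below) =====
def Claim_equal_replace_with_correct_letter : Prop := ∀ (letter : String) (word : String) (guessed_w : String), Dom_replace_with_correct_letter letter word guessed_w → Spec_replace_with_correct_letter letter word guessed_w (replace_with_correct_letter letter word guessed_w)

-- ===== LEMMAS AND PROOFS =====

theorem toList_foldl_append (l : List String) (a : String) :
    (l.foldl (fun w n => w ++ n) a).toList = a.toList ++ (l.map String.toList).flatten := by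
  induction l generalizing a with
  | nil => simp
  | cons x xs ih => simp [List.foldl_cons, ih, String.toList_append]

theorem toList_list_to_string (l : List String) :
    (list_to_string_port l).toList = (l.map String.toList).flatten := by
  simp [list_to_string_port, toList_foldl_append]

theorem flatten_map_singleton {α β : Type} (l : List α) (h : α → β) :
    (l.map (fun x => [h x])).flatten = l.map h := by
  induction l with
  | nil => rfl
  | cons x xs ih => simp [ih]

theorem flatten_set_singleton (l : List Char) (n : Nat) (c : Char) :
    ((l.map (fun ch => ([ch] : List Char))).set n [c]).flatten = l.set n c := by
  induction l generalizing n with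
  | nil => rfl
  | cons x xs ih =>
    cases n with
    | zero => simpa using flatten_map_singleton xs (fun x => x)
    | succ m => simp [List.set_cons_succ, ih]

theorem zip_snd_append_drop (w g : List Char) :
    (List.zip w g).map Prod.snd ++ g.drop w.length = g := by
  induction w generalizing g with
  | nil => simp
  | cons x xs ih =>
    cases g with
    | nil => simp
    | cons y ys => simp [ih]

theorem foldl_set_get (q : Nat → Prop) [DecidablePred q] (c : Char) :
    ∀ (idxs : List Nat) (g : List Char) (j : Nat),
      (idxs.foldl (fun g k => if q k then g.set k c else g) g)[j]? =
      if j ∈ idxs ∧ q j then (g.set j c)[j]? else g[j]? := by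
  intro idxs
  induction idxs with
  | nil => intro g j; simp
  | cons i rest ih =>
    intro g j
    simp only [List.foldl_cons]
    rw [ih]
    by_cases hji : j = i
    · subst hji
      by_cases hq : q j
      · simp [hq]
      · simp [hq]
    · by_cases hq : q j
      · by_cases hjr : j ∈ rest
        · simp [hjr, hq, hji]
          by_cases hqi : q i
          · simp [hqi, List.getElem?_set]
          · simp [hqi]
        · simp [hjr, hq, hji]
          by_cases hqi : q i
          · simp [hqi, List.getElem?_set_ne (Ne.symm hji)]
          · simp [hqi]
      · simp [hq]
        by_cases hqi : q i
        · simp [hqi, List.getElem?_set_ne (Ne.symm hji)]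
        · simp [hqi]


theorem toList_step (letter g : String) (n : Nat) :
    (list_to_string_port ((string_to_list_port g).set n letter)).toList
      = ((g.toList.map (fun ch => ([ch] : List Char))).set n letter.toList).flatten := by
  simp [toList_list_to_string, string_to_list_port, List.map_set, List.map_map,
    Function.comp_def, String.toList_ofList]

theorem toList_foldA (positions : List Int) (letter : String) (l : List (Int × Char)) :
    ∀ (g : String),
    (l.foldl (fun g p =>
        if p.1 ∈ positions then
          list_to_string_port ((string_to_list_port g).set p.1.toNat letter)
        else g) g).toList
    = l.foldl (fun g p =>
        if p.1 ∈ positions then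
          ((g.map (fun ch => ([ch] : List Char))).set p.1.toNat letter.toList).flatten
        else g) g.toList := by
  induction l with
  | nil => intro g; rfl
  | cons x xs ih =>
    intro g
    simp only [List.foldl_cons]
    by_cases h : x.1 ∈ positions
    · simp only [h, if_pos, ih, toList_step]
    · simp only [h, ih, if_false]

theorem foldl_id {α β : Type} (l : List α) (g : β) : l.foldl (fun g _ => g) g = g := by
  induction l <;> simp [*]

theorem foldl_fst (P : List Int) (c : Char) (l : List (Int × Char)) (g : List Char) :
    l.foldl (fun g p => if p.1 ∈ P then g.set p.1.toNat c else g) g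
      = (l.map (fun p => p.1)).foldl (fun g i => if i ∈ P then g.set i.toNat c else g) g := by
  induction l generalizing g <;> simp [*]

theorem replace_with_correct_letter_spec' (letter word guessed_w : String) :
    replace_with_correct_letter letter word guessed_w =
      replace_with_correct_letter_alt letter word guessed_w := by
  have hinj : ∀ s t : String, s.toList = t.toList → s = t := by
    intro s t h
    have h2 := congrArg String.ofList h
    simpa [String.ofList_toList] using h2
  apply hinj
  simp only [replace_with_correct_letter, replace_with_correct_letter_alt]
  rw [toList_foldA, String.toList_join]
  simp only [List.map_append, List.map_map, List.flatten_append, List.map_cons, List.map_nil,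
    Function.comp_def, String.toList_ofList, List.flatten_cons, List.flatten_nil, List.append_nil]
  by_cases hex : ∃ x ∈ word.toList, String.ofList [x] = letter
  · -- letter occurs in word as a character; hence letter is that single character
    obtain ⟨c, hcw, hcl⟩ := hex
    have hlt : letter.toList = [c] := by rw [← hcl, String.toList_ofList]
    have hofinj : ∀ x : Char, (String.ofList [x] = letter) ↔ x = c := by
      intro x
      constructor
      · intro h
        have h2 := congrArg String.toList h
        rw [String.toList_ofList, hlt] at h2
        simpa using h2
      · rintro rfl; exact hcl
    have hPm : ∀ j : Nat,
        (((j : Int) ∈ ((PySem.List.enumerate word.toList 0).filter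
            (fun p => String.ofList [p.2] == letter)).map (fun p => p.1))
          ↔ word.toList[j]? = some c) := by
      intro j
      simp only [List.mem_map, List.mem_filter, PySem.List.mem_enumerate_iff]
      constructor
      · rintro ⟨p, ⟨⟨k, hk, rfl⟩, hbeq⟩, hfst⟩
        simp only [zero_add, Int.natCast_inj] at hfst
        subst hfst
        rw [beq_iff_eq, hofinj] at hbeq
        simp only at hbeq
        rw [List.getElem?_eq_getElem hk, hbeq]
      · intro h
        obtain ⟨hj, hc⟩ := List.getElem?_eq_some_iff.mp h
        exact ⟨((j : Int), word.toList[j]), ⟨⟨j, hj, by simp⟩, by rw [beq_iff_eq, hofinj]; exact hc⟩, rfl⟩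
    -- A side: the char-level fold
    have hstep : (fun (g : List Char) (p : Int × Char) =>
        if p.1 ∈ ((PySem.List.enumerate word.toList 0).filter
            (fun p => String.ofList [p.2] == letter)).map (fun p => p.1) then
          ((g.map (fun ch => ([ch] : List Char))).set p.1.toNat letter.toList).flatten
        else g)
        = fun g p =>
        if p.1 ∈ ((PySem.List.enumerate word.toList 0).filter
            (fun p => String.ofList [p.2] == letter)).map (fun p => p.1) then
          g.set p.1.toNat c
        else g := by
      funext g p
      rw [hlt]
      by_cases h : p.1 ∈ ((PySem.List.enumerate word.toList 0).filter
          (fun p => String.ofList [p.2] == letter)).map (fun p => p.1)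
      · simp [h, flatten_set_singleton]
      · simp [h]
    rw [hstep, foldl_fst,
      PySem.List.map_fst_enumerate, PySem.List.pyRange_one, List.foldl_map]
    simp only [zero_add, Int.sub_zero, Int.toNat_natCast]
    -- B side: each joined piece is a single character
    have hres : (fun p : Char × Char =>
          (if String.ofList [p.1] == letter then letter else String.ofList [p.2]).toList)
        = fun p => [if p.1 = c then c else p.2] := by
      funext p
      by_cases h : p.1 = c
      · simp [beq_iff_eq, hofinj, h, hlt]
      · simp [beq_iff_eq, hofinj, h, String.toList_ofList]
    rw [hres, flatten_map_singleton]
    apply List.ext_getElem?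
    intro j
    rw [foldl_set_get]
    by_cases hjm : j < guessed_w.toList.length
    · by_cases hjn : j < word.toList.length
      · have hz : (List.zip word.toList guessed_w.toList)[j]? =
            some (word.toList[j], guessed_w.toList[j]) := by
          rw [List.getElem?_eq_getElem (by simp [List.length_zip, ← String.length_toList]; omega)]
          simp [List.getElem_zip]
        rw [List.getElem?_append_left (by simp [List.length_zip, ← String.length_toList]; omega), List.getElem?_map, hz]
        by_cases hc2 : word.toList[j] = c
        · have hq : ((j : Int) ∈ ((PySem.List.enumerate word.toList 0).filter
              (fun p => String.ofList [p.2] == letter)).map (fun p => p.1)) :=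
            (hPm j).mpr (by rw [List.getElem?_eq_getElem hjn, hc2])
          simp [hq, hjm, hc2, ← String.length_toList]
        · have hq : ¬ ((j : Int) ∈ ((PySem.List.enumerate word.toList 0).filter
              (fun p => String.ofList [p.2] == letter)).map (fun p => p.1)) := by
            rw [hPm, List.getElem?_eq_getElem hjn]
            simp [hc2]
          simp [hq, hc2, List.getElem?_eq_getElem hjm]
      · have hq : ¬ ((j : Int) ∈ ((PySem.List.enumerate word.toList 0).filter
            (fun p => String.ofList [p.2] == letter)).map (fun p => p.1)) := by
          rw [hPm, List.getElem?_eq_none (by omega)]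
          simp
        rw [List.getElem?_append_right (by simp [List.length_zip, ← String.length_toList]; omega), List.getElem?_drop]
        rw [show word.toList.length + (j - (List.map (fun p =>
            if p.1 = c then c else p.2) (List.zip word.toList guessed_w.toList)).length) = j by
          simp [List.length_zip, ← String.length_toList]; omega]
        simp [hq]
    · have h2 : ((List.map (fun p => if p.1 = c then c else p.2)
            (List.zip word.toList guessed_w.toList)) ++
            guessed_w.toList.drop word.toList.length)[j]? = none :=
        List.getElem?_eq_none (by simp [List.length_zip, ← String.length_toList]; omega)
      have hc : ¬ (j ∈ List.range guessed_w.toList.length ∧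
          ((j : Int) ∈ ((PySem.List.enumerate word.toList 0).filter
            (fun p => String.ofList [p.2] == letter)).map (fun p => p.1))) := by
        rintro ⟨hc1, -⟩
        exact hjm (List.mem_range.mp hc1)
      rw [h2, if_neg hc, List.getElem?_eq_none (l := guessed_w.toList) (by omega)]
  · -- no character of word matches letter: nothing is replaced on either side
    push_neg at hex
    have hP : ((PySem.List.enumerate word.toList 0).filter
        (fun p => String.ofList [p.2] == letter)) = [] := by
      rw [List.filter_eq_nil_iff]
      intro p hp
      rw [PySem.List.mem_enumerate_iff] at hp
      obtain ⟨k, hk, rfl⟩ := hp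
      simpa using hex _ (List.getElem_mem hk)
    rw [hP]
    simp only [List.map_nil, List.not_mem_nil, if_false, foldl_id]
    have hres : ∀ p ∈ List.zip word.toList guessed_w.toList,
        ((if String.ofList [p.1] == letter then letter else String.ofList [p.2]).toList)
          = [p.2] := by
      intro p hp
      rw [if_neg (by simpa using hex p.1 (List.of_mem_zip hp).1), String.toList_ofList]
    rw [List.map_congr_left hres, flatten_map_singleton]
    exact (zip_snd_append_drop word.toList guessed_w.toList).symm

-- ===== VERDICT (by name: the statement is the Claim_ definition above) =====
theorem replace_with_correct_letter_spec : Claim_equal_replace_with_correct_letter := by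
  intro letter word guessed_w _
  exact replace_with_correct_letter_spec' letter word guessed_w
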